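-- pv_equiv track=rewrite | github.com/Venkatasiva-18/EarthPulse-AI | EarthPulseAI/ml/remediate.py | analyze_description_nlp
-- ===== SOURCE A (Python) =====
-- def analyze_description_nlp(description):
--     if not description:
--         return []
--
--     # NLP-lite: Keyword-based suggestion refinement
--     nlp_suggestions = []
--
--     keywords = {
--         "health": ["breathing", "cough", "asthma", "eye", "skin", "rash", "health", "sick"],
--         "construction": ["dust", "cement", "construction", "building", "digging"],
--         "industrial": ["smoke", "chemical", "smell", "factory", "industrial", "toxic"],
--         "water_health": ["stomach", "drinking", "fever", "diarrhea"],
--         "noise_health": ["sleep", "headache", "concentration", "ear"]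
--     }
--
--     # Search for health-related concerns in the description
--     found_categories = []
--     for category, terms in keywords.items():
--         if any(term in description.lower() for term in terms):
--             found_categories.append(category)
--
--     if "health" in found_categories or "breathing" in description.lower():
--         nlp_suggestions.append("Immediate consultation with a healthcare professional is recommended for respiratory symptoms.")
--
--     if "construction" in found_categories:
--         nlp_suggestions.append("The detected construction dust requires specialized fine-particle filtering masks (N95 or higher).")
--
--     if "industrial" in found_categories:
--         nlp_suggestions.append("Alert local environmental authorities about potential chemical emissions immediately.")
--
--     if "water_health" in found_categories:
--         nlp_suggestions.append("Cease all use of local water for consumption until professional testing is completed.")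
--
--     return nlp_suggestions
-- ===== SOURCE B (Python) =====
-- def analyze_description_nlp(description):
--     if not description:
--         return []
--     desc = description.lower()
--     table = [
--         (["breathing", "cough", "asthma", "eye", "skin", "rash", "health", "sick"],
--          "Immediate consultation with a healthcare professional is recommended for respiratory symptoms."),
--         (["dust", "cement", "construction", "building", "digging"],
--          "The detected construction dust requires specialized fine-particle filtering masks (N95 or higher)."),
--         (["smoke", "chemical", "smell", "factory", "industrial", "toxic"],
--          "Alert local environmental authorities about potential chemical emissions immediately."),
--         (["stomach", "drinking", "fever", "diarrhea"],
--          "Cease all use of local water for consumption until professional testing is completed."),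
--     ]
--     return [msg for terms, msg in table if any(t in desc for t in terms)]
-- ===== Notes on version B (the rewrite author's own statement) =====
-- stated objective: faster
-- what changed: Replaces the two-pass detect-categories-then-dispatch structure (dict of five categories, found_categories list, membership tests, redundant 'breathing' clause, inert noise_health category) with one ordered (terms, message) table scanned once, lowering the description once.
import Mathlib
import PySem

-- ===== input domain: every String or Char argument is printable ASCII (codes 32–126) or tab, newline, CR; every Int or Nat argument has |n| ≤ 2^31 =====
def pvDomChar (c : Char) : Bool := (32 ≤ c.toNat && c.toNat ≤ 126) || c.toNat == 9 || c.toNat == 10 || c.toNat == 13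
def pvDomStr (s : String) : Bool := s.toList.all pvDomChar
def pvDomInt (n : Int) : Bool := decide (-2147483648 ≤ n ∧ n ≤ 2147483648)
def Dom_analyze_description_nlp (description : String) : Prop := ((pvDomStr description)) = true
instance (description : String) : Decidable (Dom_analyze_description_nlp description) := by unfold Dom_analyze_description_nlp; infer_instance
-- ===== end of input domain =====

-- B replaces A's two-pass detect-then-dispatch structure with one table-driven pass (simpler).


-- ===== PORT A =====
def analyze_description_nlp (description : String) : List String :=
  if description = "" then []
  else
    let keywords : List (String × List String) :=
      [("health", ["breathing", "cough", "asthma", "eye", "skin", "rash", "health", "sick"]),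
       ("construction", ["dust", "cement", "construction", "building", "digging"]),
       ("industrial", ["smoke", "chemical", "smell", "factory", "industrial", "toxic"]),
       ("water_health", ["stomach", "drinking", "fever", "diarrhea"]),
       ("noise_health", ["sleep", "headache", "concentration", "ear"])]
    let found_categories := keywords.foldl (fun acc p =>
      if p.2.any (fun t => PySem.Str.isIn t (PySem.Str.lower description)) then acc ++ [p.1] else acc) []
    let n0 : List String := []
    let n1 := if decide ("health" ∈ found_categories) || PySem.Str.isIn "breathing" (PySem.Str.lower description)
      then n0 ++ ["Immediate consultation with a healthcare professional is recommended for respiratory symptoms."] else n0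
    let n2 := if "construction" ∈ found_categories
      then n1 ++ ["The detected construction dust requires specialized fine-particle filtering masks (N95 or higher)."] else n1
    let n3 := if "industrial" ∈ found_categories
      then n2 ++ ["Alert local environmental authorities about potential chemical emissions immediately."] else n2
    let n4 := if "water_health" ∈ found_categories
      then n3 ++ ["Cease all use of local water for consumption until professional testing is completed."] else n3
    n4

-- ===== PORT B =====
def pvTable : List (List String × String) :=
  [(["breathing", "cough", "asthma", "eye", "skin", "rash", "health", "sick"],
    "Immediate consultation with a healthcare professional is recommended for respiratory symptoms."),
   (["dust", "cement", "construction", "building", "digging"],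
    "The detected construction dust requires specialized fine-particle filtering masks (N95 or higher)."),
   (["smoke", "chemical", "smell", "factory", "industrial", "toxic"],
    "Alert local environmental authorities about potential chemical emissions immediately."),
   (["stomach", "drinking", "fever", "diarrhea"],
    "Cease all use of local water for consumption until professional testing is completed.")]

def analyze_description_nlp_alt (description : String) : List String :=
  if description = "" then []
  else
    let desc := PySem.Str.lower description
    (pvTable.filter (fun row => row.1.any (fun t => PySem.Str.isIn t desc))).map (fun row => row.2)

-- ===== PRECONDITION & SPEC =====
def Spec_analyze_description_nlp (description : String) (out : List String) : Prop := out = analyze_description_nlp_alt description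
instance (description : String) (out : List String) : Decidable (Spec_analyze_description_nlp description out) := by unfold Spec_analyze_description_nlp; infer_instance

-- ===== CLAIM (what is proved, stated in full; the proofs are below) =====
def Claim_equal_analyze_description_nlp : Prop := ∀ (description : String), Dom_analyze_description_nlp description → Spec_analyze_description_nlp description (analyze_description_nlp description)

-- ===== LEMMAS AND PROOFS =====
theorem pv_main (description : String) :
    analyze_description_nlp description = analyze_description_nlp_alt description := by
  unfold analyze_description_nlp analyze_description_nlp_alt pvTable
  by_cases hd : description = ""
  · simp [hd]
  · simp only [if_neg hd, List.foldl, List.any_cons, List.any_nil, List.filter]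
    generalize PySem.Str.isIn "breathing" (PySem.Str.lower description) = b
    generalize (PySem.Str.isIn "cough" (PySem.Str.lower description) ||
        (PySem.Str.isIn "asthma" (PySem.Str.lower description) ||
        (PySem.Str.isIn "eye" (PySem.Str.lower description) ||
        (PySem.Str.isIn "skin" (PySem.Str.lower description) ||
        (PySem.Str.isIn "rash" (PySem.Str.lower description) ||
        (PySem.Str.isIn "health" (PySem.Str.lower description) ||
        (PySem.Str.isIn "sick" (PySem.Str.lower description) || false))))))) = r
    generalize (PySem.Str.isIn "dust" (PySem.Str.lower description) ||
        (PySem.Str.isIn "cement" (PySem.Str.lower description) ||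
        (PySem.Str.isIn "construction" (PySem.Str.lower description) ||
        (PySem.Str.isIn "building" (PySem.Str.lower description) ||
        (PySem.Str.isIn "digging" (PySem.Str.lower description) || false))))) = c2
    generalize (PySem.Str.isIn "smoke" (PySem.Str.lower description) ||
        (PySem.Str.isIn "chemical" (PySem.Str.lower description) ||
        (PySem.Str.isIn "smell" (PySem.Str.lower description) ||
        (PySem.Str.isIn "factory" (PySem.Str.lower description) ||
        (PySem.Str.isIn "industrial" (PySem.Str.lower description) ||
        (PySem.Str.isIn "toxic" (PySem.Str.lower description) || false)))))) = c3
    generalize (PySem.Str.isIn "stomach" (PySem.Str.lower description) ||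
        (PySem.Str.isIn "drinking" (PySem.Str.lower description) ||
        (PySem.Str.isIn "fever" (PySem.Str.lower description) ||
        (PySem.Str.isIn "diarrhea" (PySem.Str.lower description) || false)))) = c4
    generalize (PySem.Str.isIn "sleep" (PySem.Str.lower description) ||
        (PySem.Str.isIn "headache" (PySem.Str.lower description) ||
        (PySem.Str.isIn "concentration" (PySem.Str.lower description) ||
        (PySem.Str.isIn "ear" (PySem.Str.lower description) || false)))) = c5
    cases b <;> cases r <;> cases c2 <;> cases c3 <;> cases c4 <;> cases c5 <;> decide

-- ===== VERDICT (by name: the statement is the Claim_ definition above) =====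
theorem analyze_description_nlp_spec : Claim_equal_analyze_description_nlp := by
  intro d _; exact pv_main d
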